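-- pv_equiv track=rewrite | github.com/Rajashekarjampala/python | python/exercises/sets/set-11/loops/for_loop/ex12.py | check_num
-- ===== SOURCE A (Python) =====
-- def check_num(num):
--     sum=0
--     count=0
--     for i in range(1,num+1):
--         if (i%2==0):
--             sum=sum+i
--             count=count+1
--     return 'sum of {} natural numbers is : {} \nNo.of even numbers present in natural numbers upto {} is : {}'.format(num,sum,num,count)
-- ===== SOURCE B (Python) =====
-- def check_num(num):
--     count = max(num, 0) // 2
--     total = count * (count + 1)
--     return 'sum of {} natural numbers is : {} \nNo.of even numbers present in natural numbers upto {} is : {}'.format(num, total, num, count)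
-- ===== Notes on version B (the rewrite author's own statement) =====
-- stated objective: faster
-- what changed: Replaced the linear loop over the range by closed-form arithmetic: the even count is half of the bound (floored, clamped at zero) and their sum is count times its successor.
import Mathlib
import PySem

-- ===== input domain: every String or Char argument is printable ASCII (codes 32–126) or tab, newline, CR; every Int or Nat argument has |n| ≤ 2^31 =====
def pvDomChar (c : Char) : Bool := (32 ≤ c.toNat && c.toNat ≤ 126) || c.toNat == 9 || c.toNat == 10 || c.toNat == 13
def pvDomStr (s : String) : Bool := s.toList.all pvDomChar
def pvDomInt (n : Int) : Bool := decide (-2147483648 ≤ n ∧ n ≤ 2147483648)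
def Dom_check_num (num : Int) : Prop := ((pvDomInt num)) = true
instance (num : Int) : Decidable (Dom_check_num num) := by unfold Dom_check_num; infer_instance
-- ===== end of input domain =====

-- B replaces A's O(n) loop by the closed form count = max(num,0)//2, sum = count*(count+1).

-- ===== PORT A =====
-- the loop becomes a fold over range(1, num+1) accumulating (sum, count)
def check_num (num : Int) : String :=
  let sc : Int × Int :=
    (PySem.List.pyRange 1 (num + 1) 1).foldl
      (fun p i => if PySem.Int.mod i 2 = 0 then (p.1 + i, p.2 + 1) else p) (0, 0)
  "sum of " ++ PySem.Int.toStr num ++ " natural numbers is : " ++ PySem.Int.toStr sc.1 ++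
  " \nNo.of even numbers present in natural numbers upto " ++ PySem.Int.toStr num ++
  " is : " ++ PySem.Int.toStr sc.2

-- ===== PORT B =====
def check_num_alt (num : Int) : String :=
  let count : Int := PySem.Int.floordiv (max num 0) 2
  let total : Int := count * (count + 1)
  "sum of " ++ PySem.Int.toStr num ++ " natural numbers is : " ++ PySem.Int.toStr total ++
  " \nNo.of even numbers present in natural numbers upto " ++ PySem.Int.toStr num ++
  " is : " ++ PySem.Int.toStr count

-- ===== PRECONDITION & SPEC =====
def Spec_check_num (num : Int) (out : String) : Prop := out = check_num_alt num
instance (num : Int) (out : String) : Decidable (Spec_check_num num out) := by unfold Spec_check_num; infer_instance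

-- ===== CLAIM (what is proved, stated in full; the proofs are below) =====
def Claim_equal_check_num : Prop := ∀ (num : Int), Dom_check_num num → Spec_check_num num (check_num num)

-- ===== LEMMAS AND PROOFS =====

-- the loop's value in closed form, for upper bound n : Nat (range 1..n)
theorem check_num_loop (n : Nat) :
    (PySem.List.pyRange 1 ((n : Int) + 1) 1).foldl
      (fun (p : Int × Int) i => if PySem.Int.mod i 2 = 0 then (p.1 + i, p.2 + 1) else p) (0, 0)
    = (((n : Int) / 2) * ((n : Int) / 2 + 1), (n : Int) / 2) := by
  induction n with
  | zero => simp [PySem.List.pyRange_one_eq_nil]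
  | succ m ih =>
    push_cast
    rw [PySem.List.pyRange_one_succ_right (by omega), List.foldl_append, ih]
    simp only [List.foldl, PySem.Int.mod_eq_emod_of_pos (by norm_num : (0:Int) < 2)]
    rcases Int.even_or_odd (m : Int) with ⟨k, hk⟩ | ⟨k, hk⟩
    · -- m even, so m+1 odd: branch not taken
      rw [if_neg (by omega)]
      have h : ((m : Int) + 1) / 2 = (m : Int) / 2 := by omega
      rw [h]
    · -- m odd, so m+1 even: branch taken
      rw [if_pos (by omega)]
      have hd : ((m : Int) + 1) / 2 = (m : Int) / 2 + 1 := by omega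
      have hm : (m : Int) = 2 * ((m : Int) / 2) + 1 := by omega
      rw [hd]
      simp only [Prod.mk.injEq, and_true]
      nlinarith

theorem check_num_eq (num : Int) : check_num num = check_num_alt num := by
  unfold check_num check_num_alt
  rw [PySem.Int.floordiv_eq_ediv_of_pos (by norm_num : (0:Int) < 2)]
  by_cases h : num ≤ 0
  · rw [PySem.List.pyRange_one_eq_nil (by omega), max_eq_right h]
    norm_num
  · rw [max_eq_left (by omega)]
    obtain ⟨n, rfl⟩ : ∃ n : Nat, num = (n : Int) := ⟨num.toNat, by omega⟩
    rw [check_num_loop]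

-- ===== VERDICT (by name: the statement is the Claim_ definition above) =====
theorem check_num_spec : Claim_equal_check_num := by
  intro num _
  exact check_num_eq num
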